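-- pv_equiv track=rewrite | github.com/mozilla-services/remote-worker-server | remote_server/authentication.py | scope_matches
-- ===== SOURCE A (Python) =====
-- def scope_matches(provided, required):
--     """Check that required scopes match the ones provided. This is used during
--     token verification to raise errors if expected scopes are not met.
--
--     :note:
--
--         Sub-scopes are expressed using semi-colons.
--
--         A required sub-scope will always match if its root-scope is among those
--         provided (e.g. ``profile:avatar`` will match ``profile`` if provided).
--
--     :param provided: list of scopes provided for the current token.
--     :param required: the scope required (e.g. by the application).
--     :returns: ``True`` if all required scopes are provided, ``False`` if not.
--     """
--     if not isinstance(required, (list, tuple)):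
--         required = [required]
--
--     def split_subscope(s):
--         return tuple((s.split(':') + [None])[:2])
--
--     provided = set([split_subscope(p) for p in provided])
--     required = set([split_subscope(r) for r in required])
--
--     root_provided = set([root for (root, sub) in provided])
--     root_required = set([root for (root, sub) in required])
--
--     if not root_required.issubset(root_provided):
--         return False
--
--     for (root, sub) in required:
--         if (root, None) in provided:
--             provided.add((root, sub))
--
--     return required.issubset(provided)
-- ===== SOURCE B (Python) =====
-- def scope_matches(provided, required):
--     """Check that required scopes match the ones provided (direct per-scope test)."""
--     if not isinstance(required, (list, tuple)):
--         required = [required]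
--
--     def split_subscope(s):
--         return tuple((s.split(':') + [None])[:2])
--
--     provided_pairs = {split_subscope(p) for p in provided}
--     return all(
--         (root, sub) in provided_pairs or (root, None) in provided_pairs
--         for root, sub in (split_subscope(r) for r in required)
--     )
-- ===== Notes on version B (the rewrite author's own statement) =====
-- stated objective: simpler
-- what changed: B tests each required scope directly against one set of provided (root, sub) pairs with a single all(), dropping A's required-set and root-set construction, the issubset pre-check and the in-place set-mutation loop.
import Mathlib
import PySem

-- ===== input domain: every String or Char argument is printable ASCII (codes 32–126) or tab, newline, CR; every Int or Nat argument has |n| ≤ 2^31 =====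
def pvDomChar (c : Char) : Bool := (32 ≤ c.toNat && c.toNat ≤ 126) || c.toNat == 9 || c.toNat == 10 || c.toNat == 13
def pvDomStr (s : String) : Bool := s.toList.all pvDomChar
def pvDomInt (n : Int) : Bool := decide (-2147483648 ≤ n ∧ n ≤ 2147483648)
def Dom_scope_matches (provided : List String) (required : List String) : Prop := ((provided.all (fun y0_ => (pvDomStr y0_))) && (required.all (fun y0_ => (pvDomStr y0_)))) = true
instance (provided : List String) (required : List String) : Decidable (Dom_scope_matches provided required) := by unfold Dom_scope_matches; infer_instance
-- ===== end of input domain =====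

-- B replaces A's root-sets, issubset pre-check and set-mutation loop by one per-required-scope
-- membership test (simpler decomposition, same cost). Return-value equivalence only.

-- ===== PORT A =====
-- helper shared by both Pythons: split_subscope(s) = tuple((s.split(':') + [None])[:2])
def splitSubscope (s : String) : Option String × Option String :=
  match (((PySem.Str.split? s ":").getD []).map Option.some ++ [none]).take 2 with
  | [a, b] => (a, b)
  | _ => (none, none)  -- unreachable: split always yields at least one piece

def scope_matches (provided : List String) (required : List String) : Bool :=
  -- required is a list here, so the isinstance branch never fires
  let providedS : PySem.Set (Option String × Option String) :=
    PySem.Set.ofList (provided.map splitSubscope)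
  let requiredS : PySem.Set (Option String × Option String) :=
    PySem.Set.ofList (required.map splitSubscope)
  let rootProvided := PySem.Set.ofList (providedS.map Prod.fst)
  let rootRequired := PySem.Set.ofList (requiredS.map Prod.fst)
  if !(PySem.Set.issubset rootRequired rootProvided) then false
  else
    let providedS' := requiredS.foldl
      (fun p rs => if PySem.Set.contains p (rs.1, none) then PySem.Set.add p (rs.1, rs.2) else p)
      providedS
    PySem.Set.issubset requiredS providedS'

-- ===== PORT B =====
def scope_matches_alt (provided : List String) (required : List String) : Bool :=
  let providedPairs : PySem.Set (Option String × Option String) :=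
    PySem.Set.ofList (provided.map splitSubscope)
  required.all (fun r =>
    let rs := splitSubscope r
    PySem.Set.contains providedPairs rs || PySem.Set.contains providedPairs (rs.1, none))

-- ===== PRECONDITION & SPEC =====
def Spec_scope_matches (provided : List String) (required : List String) (out : Bool) : Prop := out = scope_matches_alt provided required
instance (provided : List String) (required : List String) (out : Bool) : Decidable (Spec_scope_matches provided required out) := by unfold Spec_scope_matches; infer_instance

-- ===== CLAIM (what is proved, stated in full; the proofs are below) =====
def Claim_equal_scope_matches : Prop := ∀ (provided : List String) (required : List String), Dom_scope_matches provided required → Spec_scope_matches provided required (scope_matches provided required)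

-- ===== LEMMAS AND PROOFS =====

-- the loop step never creates a new (root, none) pair
theorem mem_none_step (p : PySem.Set (Option String × Option String))
    (x : Option String × Option String) (q : Option String) :
    ((q, (none : Option String)) ∈
      (if PySem.Set.contains p (x.1, none) then PySem.Set.add p (x.1, x.2) else p))
      ↔ (q, (none : Option String)) ∈ p := by
  split_ifs with h
  · rw [PySem.Set.mem_add]
    constructor
    · rintro (h1 | h1)
      · exact h1
      · rw [PySem.Set.contains_iff] at h
        have hq : q = x.1 := (Prod.ext_iff.mp h1).1
        have hn : (none : Option String) = x.2 := (Prod.ext_iff.mp h1).2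
        subst hq; exact h
    · exact Or.inl
  · exact Iff.rfl

-- membership after A's mutation loop
theorem mem_foldl_step (l : List (Option String × Option String))
    (p : PySem.Set (Option String × Option String)) (x : Option String × Option String) :
    x ∈ l.foldl
        (fun p rs => if PySem.Set.contains p (rs.1, none) then PySem.Set.add p (rs.1, rs.2) else p) p
      ↔ x ∈ p ∨ (x ∈ l ∧ (x.1, (none : Option String)) ∈ p) := by
  induction l generalizing p with
  | nil => simp
  | cons y l ih =>
    simp only [List.foldl_cons, ih]
    have hstep : x ∈ (if PySem.Set.contains p (y.1, none) then PySem.Set.add p (y.1, y.2) else p)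
        ↔ x ∈ p ∨ (x = y ∧ (y.1, (none : Option String)) ∈ p) := by
      split_ifs with h
      · rw [PySem.Set.mem_add, PySem.Set.contains_iff] at *
        constructor
        · rintro (h1 | h1)
          · exact Or.inl h1
          · exact Or.inr ⟨by simpa using h1, h⟩
        · rintro (h1 | ⟨h1, _⟩)
          · exact Or.inl h1
          · exact Or.inr (by simpa using h1)
      · constructor
        · exact Or.inl
        · rintro (h1 | ⟨h1, h2⟩)
          · exact h1
          · rw [PySem.Set.contains_iff] at h; subst h1; exact absurd h2 h
    rw [hstep, mem_none_step]
    constructor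
    · rintro ((h1 | ⟨h1, h2⟩) | ⟨h1, h2⟩)
      · exact Or.inl h1
      · exact Or.inr ⟨by simp [h1], by subst h1; exact h2⟩
      · exact Or.inr ⟨List.mem_cons_of_mem _ h1, h2⟩
    · rintro (h1 | ⟨h1, h2⟩)
      · exact Or.inl (Or.inl h1)
      · rcases List.mem_cons.mp h1 with h1 | h1
        · exact Or.inl (Or.inr ⟨h1, by subst h1; exact h2⟩)
        · exact Or.inr ⟨h1, h2⟩

theorem scope_matches_eq (provided required : List String) :
    scope_matches provided required = scope_matches_alt provided required := by
  unfold scope_matches scope_matches_alt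
  simp only []
  set P := PySem.Set.ofList (provided.map splitSubscope) with hP
  -- B's predicate, as a Prop
  have hB : (required.all (fun r =>
      PySem.Set.contains P (splitSubscope r) || PySem.Set.contains P ((splitSubscope r).1, none)))
      = true ↔ ∀ r ∈ required, splitSubscope r ∈ P ∨ ((splitSubscope r).1, (none : Option String)) ∈ P := by
    simp [List.all_eq_true]
  by_cases hroot : PySem.Set.issubset
      (PySem.Set.ofList ((PySem.Set.ofList (required.map splitSubscope)).map Prod.fst))
      (PySem.Set.ofList (P.map Prod.fst)) = true
  · simp only [hroot, Bool.not_true, Bool.false_eq_true, if_false]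
    rw [Bool.eq_iff_iff, PySem.Set.issubset_iff, hB]
    constructor
    · intro h r hr
      have := h (splitSubscope r) (by
        rw [PySem.Set.mem_ofList]; exact List.mem_map_of_mem hr)
      rw [mem_foldl_step] at this
      rcases this with h1 | ⟨_, h1⟩
      · exact Or.inl h1
      · exact Or.inr h1
    · intro h x hx
      rw [PySem.Set.mem_ofList] at hx
      obtain ⟨r, hr, rfl⟩ := List.mem_map.mp hx
      rw [mem_foldl_step]
      rcases h r hr with h1 | h1
      · exact Or.inl h1
      · exact Or.inr ⟨(PySem.Set.mem_ofList _ _).mpr (List.mem_map_of_mem hr), h1⟩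
  · simp only [hroot, Bool.not_false, if_true]
    symm
    rw [← Bool.not_eq_true, hB]
    intro hall
    apply hroot
    rw [PySem.Set.issubset_iff]
    intro root hrootmem
    rw [PySem.Set.mem_ofList] at hrootmem ⊢
    obtain ⟨x, hx, rfl⟩ := List.mem_map.mp hrootmem
    rw [PySem.Set.mem_ofList] at hx
    obtain ⟨r, hr, rfl⟩ := List.mem_map.mp hx
    rcases hall r hr with h1 | h1
    · exact List.mem_map_of_mem h1
    · have : ((splitSubscope r).1, (none : Option String)).1 ∈ P.map Prod.fst :=
        List.mem_map_of_mem h1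
      simpa using this

-- ===== VERDICT (by name: the statement is the Claim_ definition above) =====
theorem scope_matches_spec : Claim_equal_scope_matches := by
  intro provided required _
  unfold Spec_scope_matches
  exact scope_matches_eq provided required
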